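-- pv_equiv track=rewrite | github.com/wongrich666/NewStageMaker | workflow_code_skeleton/app/services/fastgpt_client.py | _is_non_output_metadata
-- ===== SOURCE A (Python) =====
-- from typing import Any, Iterable
--
-- def _is_non_output_metadata(candidate: dict[str, Any]) -> bool:
--     keys = {str(key).lower() for key in candidate.keys()}
--     if "historypreview" in keys:
--         return True
--     if "reasoningtext" in keys or "reasoning_text" in keys:
--         return True
--     if "system_error_text" in keys or "system_errortext" in keys:
--         return True
--     if "obj" in keys and "value" in keys:
--         return True
--     metadata_only_keys = {
--         "obj",
--         "value",
--         "type",
--         "module",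
--         "moduleid",
--         "nodeid",
--         "name",
--         "avatar",
--         "status",
--     }
--     return bool(keys) and keys.issubset(metadata_only_keys)
-- ===== SOURCE B (Python) =====
-- def _is_non_output_metadata(candidate: dict) -> bool:
--     saw_obj = saw_value = False
--     all_allowed = True
--     nonempty = False
--     for key in candidate.keys():
--         low = str(key).lower()
--         if low in ("historypreview", "reasoningtext", "reasoning_text",
--                    "system_error_text", "system_errortext"):
--             return True
--         nonempty = True
--         if low == "obj":
--             saw_obj = True
--         if low == "value":
--             saw_value = True
--         if low not in ("obj", "value", "type", "module", "moduleid",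
--                        "nodeid", "name", "avatar", "status"):
--             all_allowed = False
--     if saw_obj and saw_value:
--         return True
--     return nonempty and all_allowed
-- ===== Notes on version B (the rewrite author's own statement) =====
-- stated objective: alternative
-- what changed: A builds an intermediate lowercased key set and runs several membership tests plus a separate subset check against it; B makes one pass over the keys, lowercasing each key once, early-returning True on trigger keys and maintaining saw_obj/saw_value/all_allowed/nonempty flags, so the set and the subset pass disappear.
import Mathlib
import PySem

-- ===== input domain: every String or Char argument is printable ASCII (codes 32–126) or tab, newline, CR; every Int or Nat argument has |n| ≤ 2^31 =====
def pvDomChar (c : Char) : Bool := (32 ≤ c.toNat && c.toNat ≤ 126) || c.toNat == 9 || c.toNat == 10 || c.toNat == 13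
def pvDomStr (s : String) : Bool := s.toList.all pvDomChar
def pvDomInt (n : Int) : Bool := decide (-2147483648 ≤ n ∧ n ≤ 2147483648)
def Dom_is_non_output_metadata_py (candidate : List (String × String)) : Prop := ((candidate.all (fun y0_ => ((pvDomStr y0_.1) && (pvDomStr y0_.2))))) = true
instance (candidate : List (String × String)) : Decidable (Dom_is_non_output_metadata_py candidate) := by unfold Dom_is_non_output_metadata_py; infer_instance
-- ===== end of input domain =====

-- B replaces A's intermediate lowercased key set and its separate membership/subset
-- passes by a single pass over the keys maintaining flags (objective: alternative, one traversal).

-- ===== PORT A =====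
def is_non_output_metadata_py (candidate : List (String × String)) : Bool :=
  let keys : PySem.Set String :=
    PySem.Set.ofList (candidate.map (fun p => PySem.Str.lower p.1))
  if keys.contains "historypreview" then true
  else if keys.contains "reasoningtext" || keys.contains "reasoning_text" then true
  else if keys.contains "system_error_text" || keys.contains "system_errortext" then true
  else if keys.contains "obj" && keys.contains "value" then true
  else
    let metadata_only_keys : PySem.Set String :=
      PySem.Set.ofList ["obj", "value", "type", "module", "moduleid", "nodeid",
                        "name", "avatar", "status"]
    !keys.isEmpty && keys.issubset metadata_only_keys

-- ===== PORT B =====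
-- B's single pass: early return True on a trigger key, otherwise maintain flags.
def metaAltLoop (l : List (String × String)) (sawObj sawValue allAllowed nonempty : Bool) : Bool :=
  match l with
  | [] => if sawObj && sawValue then true else nonempty && allAllowed
  | p :: rest =>
    let low := PySem.Str.lower p.1
    if ["historypreview", "reasoningtext", "reasoning_text",
        "system_error_text", "system_errortext"].contains low then true
    else
      metaAltLoop rest (sawObj || low == "obj") (sawValue || low == "value")
        (allAllowed && ["obj", "value", "type", "module", "moduleid", "nodeid",
                        "name", "avatar", "status"].contains low)
        true

def is_non_output_metadata_py_alt (candidate : List (String × String)) : Bool :=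
  metaAltLoop candidate false false true false

-- ===== PRECONDITION & SPEC =====
def Spec_is_non_output_metadata_py (candidate : List (String × String)) (out : Bool) : Prop := out = is_non_output_metadata_py_alt candidate
instance (candidate : List (String × String)) (out : Bool) : Decidable (Spec_is_non_output_metadata_py candidate out) := by unfold Spec_is_non_output_metadata_py; infer_instance

-- ===== CLAIM (what is proved, stated in full; the proofs are below) =====
def Claim_equal_is_non_output_metadata_py : Prop := ∀ (candidate : List (String × String)), Dom_is_non_output_metadata_py candidate → Spec_is_non_output_metadata_py candidate (is_non_output_metadata_py candidate)

-- ===== LEMMAS AND PROOFS =====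

-- port A's set operations, reduced to the underlying key list
theorem pv_contains_ofList (xs : List String) (y : String) :
    (PySem.Set.ofList xs).contains y = xs.contains y := by
  rw [Bool.eq_iff_iff]
  simp [PySem.Set.contains, PySem.Set.mem_ofList]

theorem pv_isEmpty_ofList (xs : List String) :
    (PySem.Set.ofList xs).isEmpty = xs.isEmpty := by
  rw [Bool.eq_iff_iff]
  simp [List.isEmpty_iff, List.eq_nil_iff_forall_not_mem]

theorem pv_issubset_ofList (xs ys : List String) :
    (PySem.Set.ofList xs).issubset (PySem.Set.ofList ys) = xs.all (fun x => ys.contains x) := by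
  rw [Bool.eq_iff_iff]
  rw [PySem.Set.issubset_iff]
  simp [PySem.Set.mem_ofList]

-- common closed form both programs compute, over the lowercased key list
def pvForm (l : List (String × String)) (sawObj sawValue allAllowed nonempty : Bool) : Bool :=
  let L := l.map (fun p => PySem.Str.lower p.1)
  L.contains "historypreview" || L.contains "reasoningtext" || L.contains "reasoning_text"
    || L.contains "system_error_text" || L.contains "system_errortext"
    || ((sawObj || L.contains "obj") && (sawValue || L.contains "value"))
    || ((nonempty || !l.isEmpty)
        && (allAllowed && L.all (fun x =>
              (["obj", "value", "type", "module", "moduleid", "nodeid",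
                "name", "avatar", "status"] : List String).contains x)))

theorem metaAltLoop_eq_form (l : List (String × String)) :
    ∀ sawObj sawValue allAllowed nonempty,
      metaAltLoop l sawObj sawValue allAllowed nonempty
        = pvForm l sawObj sawValue allAllowed nonempty := by
  induction l with
  | nil =>
    intro so sv aa ne
    simp only [metaAltLoop, pvForm, List.map_nil, List.contains_nil, List.isEmpty_nil,
      List.all_nil, Bool.or_false, Bool.false_or, Bool.not_true, Bool.and_true]
    revert so sv aa ne; decide
  | cons p rest ih =>
    intro so sv aa ne
    simp only [metaAltLoop]
    cases htrig : (["historypreview", "reasoningtext", "reasoning_text",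
        "system_error_text", "system_errortext"] : List String).contains (PySem.Str.lower p.1) with
    | true =>
      simp only [if_true]
      simp only [List.contains_eq_mem, List.mem_cons, List.not_mem_nil, or_false,
        decide_eq_true_eq] at htrig
      rw [Bool.eq_iff_iff]
      simp only [pvForm, List.map_cons, List.contains_cons, true_iff, Bool.or_eq_true,
        beq_iff_eq]
      rcases htrig with h | h | h | h | h <;> simp [h]
    | false =>
      rw [if_neg (by simp)]
      rw [ih]
      simp only [List.contains_eq_mem, List.mem_cons, List.not_mem_nil, or_false,
        decide_eq_false_iff_not, not_or] at htrig
      obtain ⟨h1, h2, h3, h4, h5⟩ := htrig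
      have e1 : (("historypreview" : String) == PySem.Str.lower p.1) = false := by
        simp [Ne.symm h1]
      have e2 : (("reasoningtext" : String) == PySem.Str.lower p.1) = false := by
        simp [Ne.symm h2]
      have e3 : (("reasoning_text" : String) == PySem.Str.lower p.1) = false := by
        simp [Ne.symm h3]
      have e4 : (("system_error_text" : String) == PySem.Str.lower p.1) = false := by
        simp [Ne.symm h4]
      have e5 : (("system_errortext" : String) == PySem.Str.lower p.1) = false := by
        simp [Ne.symm h5]
      simp only [pvForm, List.map_cons, List.contains_cons, List.all_cons, List.isEmpty_cons,
        e1, e2, e3, e4, e5, Bool.false_or, Bool.not_false, Bool.or_true, Bool.true_and]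
      have eo : (("obj" : String) == PySem.Str.lower p.1) = (PySem.Str.lower p.1 == "obj") := by
        rw [Bool.eq_iff_iff]; simp only [beq_iff_eq]; exact eq_comm
      have ev : (("value" : String) == PySem.Str.lower p.1) = (PySem.Str.lower p.1 == "value") := by
        rw [Bool.eq_iff_iff]; simp only [beq_iff_eq]; exact eq_comm
      rw [eo, ev]
      simp only [Bool.true_or, Bool.true_and, Bool.or_assoc, Bool.and_assoc]

theorem portA_eq_form (candidate : List (String × String)) :
    is_non_output_metadata_py candidate = pvForm candidate false false true false := by
  simp only [is_non_output_metadata_py, pvForm, pv_contains_ofList, pv_isEmpty_ofList,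
    pv_issubset_ofList, List.isEmpty_map, Bool.false_or, Bool.true_and]
  generalize (candidate.map (fun p => PySem.Str.lower p.1)).contains "historypreview" = c1
  generalize (candidate.map (fun p => PySem.Str.lower p.1)).contains "reasoningtext" = c2
  generalize (candidate.map (fun p => PySem.Str.lower p.1)).contains "reasoning_text" = c3
  generalize (candidate.map (fun p => PySem.Str.lower p.1)).contains "system_error_text" = c4
  generalize (candidate.map (fun p => PySem.Str.lower p.1)).contains "system_errortext" = c5
  generalize (candidate.map (fun p => PySem.Str.lower p.1)).contains "obj" = co
  generalize (candidate.map (fun p => PySem.Str.lower p.1)).contains "value" = cv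
  generalize candidate.isEmpty = be
  generalize (candidate.map (fun p => PySem.Str.lower p.1)).all (fun x =>
      (["obj", "value", "type", "module", "moduleid", "nodeid",
        "name", "avatar", "status"] : List String).contains x) = sub
  revert c1 c2 c3 c4 c5 co cv be sub
  decide

-- ===== VERDICT (by name: the statement is the Claim_ definition above) =====
theorem is_non_output_metadata_py_spec : Claim_equal_is_non_output_metadata_py := by
  intro candidate _
  unfold Spec_is_non_output_metadata_py
  rw [portA_eq_form, is_non_output_metadata_py_alt, metaAltLoop_eq_form]
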